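-- pv_equiv track=rewrite | github.com/performlikemj/sautai | meals/sous_chef_assistant.py | _inject_summary_into_history
-- ===== SOURCE A (Python) =====
-- from typing import Dict, Any, List, Generator, Optional, Union, Literal
--
-- def _inject_summary_into_history(history: List[Dict], summary: str) -> List[Dict]:
--     """
--     Inject conversation summary into history as a system message after the main system prompt.
--
--     Args:
--         history: The conversation history
--         summary: The summary to inject
--
--     Returns:
--         History with summary injected
--     """
--     if not summary:
--         return history
--
--     summary_message = {
--         "role": "system",
--         "content": f"[Previous conversation summary - use this context to maintain continuity]:\n{summary}"
--     }
--
--     # Find position after first system message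
--     result = []
--     system_found = False
--     summary_injected = False
--
--     for msg in history:
--         result.append(msg)
--         if not summary_injected and msg.get('role') == 'system':
--             system_found = True
--         elif system_found and not summary_injected:
--             # Inject summary right after the first system message
--             result.insert(-1, summary_message)
--             summary_injected = True
--
--     # If no system message found, prepend the summary
--     if not summary_injected:
--         result.insert(0, summary_message)
--
--     return result
-- ===== SOURCE B (Python) =====
-- from typing import Dict, List
--
-- def _inject_summary_into_history(history: List[Dict], summary: str) -> List[Dict]:
--     """Insert the summary system message after the leading system block, by index arithmetic."""
--     if not summary:
--         return history
--
--     summary_message = {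
--         "role": "system",
--         "content": f"[Previous conversation summary - use this context to maintain continuity]:\n{summary}"
--     }
--
--     # index of the first system message
--     i = next((k for k, m in enumerate(history) if m.get('role') == 'system'), None)
--     if i is None:
--         return [summary_message] + history
--
--     # first non-system message after it
--     j = next((k for k in range(i + 1, len(history)) if history[k].get('role') != 'system'), None)
--     if j is None:
--         # first system message is last or followed only by system messages: A prepends
--         return [summary_message] + history
--
--     return history[:j] + [summary_message] + history[j:]
-- ===== Notes on version B (the rewrite author's own statement) =====
-- stated objective: simpler
-- what changed: Replaces A's stateful flag-driven loop (system_found/summary_injected with an insert(-1) mid-append) by two index scans: find the first system message, find the first non-system message after it, and splice the summary in with take/drop (prepending when either scan fails), preserving A's prepend when the first system message has no non-system successor.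
import Mathlib
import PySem

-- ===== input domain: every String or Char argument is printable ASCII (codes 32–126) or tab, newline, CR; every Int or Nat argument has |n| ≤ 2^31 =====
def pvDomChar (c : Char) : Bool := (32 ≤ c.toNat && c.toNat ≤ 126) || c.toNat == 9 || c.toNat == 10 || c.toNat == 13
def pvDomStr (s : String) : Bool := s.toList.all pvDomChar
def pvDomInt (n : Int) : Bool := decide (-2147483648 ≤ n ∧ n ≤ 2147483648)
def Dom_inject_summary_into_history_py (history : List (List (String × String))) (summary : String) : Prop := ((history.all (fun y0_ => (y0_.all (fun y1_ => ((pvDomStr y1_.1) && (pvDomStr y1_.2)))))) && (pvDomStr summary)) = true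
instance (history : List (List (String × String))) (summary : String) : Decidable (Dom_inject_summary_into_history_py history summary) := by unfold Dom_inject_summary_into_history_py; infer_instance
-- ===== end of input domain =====

-- B replaces A's stateful one-pass loop by two index scans and a take/drop splice (objective: simpler).

-- shared tiny helper: msg.get('role') == 'system' on an association-list dict (first match)
def pvIsSystem (msg : List (String × String)) : Bool :=
  ((msg.find? (fun p => p.1 == "role")).map (·.2)) == some "system"

-- ===== PORT A =====
-- A's loop: carries (result, system_found, summary_injected); returns (result, summary_injected)
def pvInjLoopA (sm : List (String × String)) (msgs : List (List (String × String)))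
    (result : List (List (String × String))) (found injected : Bool) :
    List (List (String × String)) × Bool :=
  match msgs with
  | [] => (result, injected)
  | msg :: rest =>
    let result := result ++ [msg]
    if !injected && pvIsSystem msg then
      pvInjLoopA sm rest result true injected
    else if found && !injected then
      -- result.insert(-1, summary_message)
      pvInjLoopA sm rest (PySem.List.insert result (-1) sm) found true
    else
      pvInjLoopA sm rest result found injected

def inject_summary_into_history_py (history : List (List (String × String))) (summary : String) : List (List (String × String)) :=
  if summary = "" then history
  else
    let sm : List (String × String) :=
      [("role", "system"),
       ("content", "[Previous conversation summary - use this context to maintain continuity]:\n" ++ summary)]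
    let r := pvInjLoopA sm history [] false false
    if r.2 then r.1 else PySem.List.insert r.1 0 sm

-- ===== PORT B =====
def inject_summary_into_history_py_alt (history : List (List (String × String))) (summary : String) : List (List (String × String)) :=
  if summary = "" then history
  else
    let sm : List (String × String) :=
      [("role", "system"),
       ("content", "[Previous conversation summary - use this context to maintain continuity]:\n" ++ summary)]
    match history.findIdx? pvIsSystem with
    | none => sm :: history
    | some i =>
      match (history.drop (i + 1)).findIdx? (fun m => !pvIsSystem m) with
      | none => sm :: history
      | some k =>
        let j := i + 1 + k
        history.take j ++ sm :: history.drop j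

-- ===== PRECONDITION & SPEC =====
def Spec_inject_summary_into_history_py (history : List (List (String × String))) (summary : String) (out : List (List (String × String))) : Prop := out = inject_summary_into_history_py_alt history summary
instance (history : List (List (String × String))) (summary : String) (out : List (List (String × String))) : Decidable (Spec_inject_summary_into_history_py history summary out) := by unfold Spec_inject_summary_into_history_py; infer_instance

-- ===== CLAIM (what is proved, stated in full; the proofs are below) =====
def Claim_equal_inject_summary_into_history_py : Prop := ∀ (history : List (List (String × String))) (summary : String), Dom_inject_summary_into_history_py history summary → Spec_inject_summary_into_history_py history summary (inject_summary_into_history_py history summary)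

-- ===== LEMMAS AND PROOFS =====

-- python list.insert(-1, x) on a nonempty list r ++ [m] puts x before the last element
theorem pv_insert_neg_one {α : Type} (r : List α) (m x : α) :
    PySem.List.insert (r ++ [m]) (-1) x = r ++ [x, m] := by
  simp [PySem.List.insert, PySem.List.sliceIndices]

-- once injected, the loop only appends the rest
theorem loopA_injected (sm : List (String × String)) (msgs : List (List (String × String)))
    (result : List (List (String × String))) (found : Bool) :
    pvInjLoopA sm msgs result found true = (result ++ msgs, true) := by
  induction msgs generalizing result with
  | nil => simp [pvInjLoopA]
  | cons msg rest ih => simp [pvInjLoopA, ih]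

-- after a system message was seen: inject before the first non-system message
theorem loopA_found (sm : List (String × String)) (msgs : List (List (String × String)))
    (result : List (List (String × String))) :
    pvInjLoopA sm msgs result true false =
      match msgs.findIdx? (fun m => !pvIsSystem m) with
      | none => (result ++ msgs, false)
      | some j => (result ++ msgs.take j ++ sm :: msgs.drop j, true) := by
  induction msgs generalizing result with
  | nil => simp [pvInjLoopA]
  | cons msg rest ih =>
    by_cases h : pvIsSystem msg
    · rw [List.findIdx?_cons]
      simp only [h, Bool.not_true, if_neg Bool.false_ne_true]
      rw [pvInjLoopA]
      simp only [h, Bool.not_false, Bool.true_and, ih]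
      cases hf : rest.findIdx? (fun m => !pvIsSystem m) with
      | none => simp
      | some j => simp
    · rw [List.findIdx?_cons]
      rw [pvInjLoopA]
      rw [if_neg (by simp [h]), if_pos (by simp), pv_insert_neg_one, loopA_injected]
      simp [eq_false_of_ne_true h]

-- initial state: skip until the first system message
theorem loopA_start (sm : List (String × String)) (msgs : List (List (String × String)))
    (result : List (List (String × String))) :
    pvInjLoopA sm msgs result false false =
      match msgs.findIdx? pvIsSystem with
      | none => (result ++ msgs, false)
      | some i => pvInjLoopA sm (msgs.drop (i + 1)) (result ++ msgs.take (i + 1)) true false := by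
  induction msgs generalizing result with
  | nil => simp [pvInjLoopA]
  | cons msg rest ih =>
    by_cases h : pvIsSystem msg
    · rw [List.findIdx?_cons, if_pos h, pvInjLoopA]
      simp [h]
    · rw [List.findIdx?_cons, if_neg (by simp [h]), pvInjLoopA]
      rw [if_neg (by simp [h]), if_neg (by simp), ih]
      cases hf : rest.findIdx? pvIsSystem with
      | none => simp
      | some i => simp

-- ===== VERDICT (by name: the statement is the Claim_ definition above) =====
theorem inject_summary_into_history_py_spec : Claim_equal_inject_summary_into_history_py := by
  intro history summary _
  unfold Spec_inject_summary_into_history_py inject_summary_into_history_py inject_summary_into_history_py_alt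
  by_cases hs : summary = ""
  · simp [hs]
  · simp only [if_neg hs]
    rw [loopA_start]
    cases hfi : history.findIdx? pvIsSystem with
    | none => simp [PySem.List.insert_zero]
    | some i =>
      simp only []
      rw [loopA_found]
      cases hfj : (history.drop (i + 1)).findIdx? (fun m => !pvIsSystem m) with
      | none =>
        simp [PySem.List.insert_zero]
      | some k =>
        have h1 : history.take (i + 1 + k) = history.take (i + 1) ++ (history.drop (i + 1)).take k := by
          rw [List.take_add]
        have h2 : (history.drop (i + 1)).drop k = history.drop (i + 1 + k) := by
          rw [List.drop_drop]
        simp only [h1, h2, List.append_assoc]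
        simp
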